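-- pv_equiv track=rewrite | github.com/risi-kondor/GElib | python/src/gelib/SO3vec.py | CGproductType
-- ===== SOURCE A (Python) =====
-- def CGproductType(x, y, maxl=-1):
--     if maxl == -1:
--         maxl = len(x)+len(y)-2
--     maxl = min(maxl, len(x)+len(y)-2)
--     r = [0]*(maxl+1)
--     for l1 in range(0, len(x)):
--         for l2 in range(0, len(y)):
--             for l in range(abs(l1-l2), min(l1+l2, maxl)+1):
--                 r[l] += x[l1]*y[l2]
--     return r
-- ===== SOURCE B (Python) =====
-- def CGproductType(x, y, maxl=-1):
--     if maxl == -1: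
--         maxl = len(x)+len(y)-2
--     maxl = min(maxl, len(x)+len(y)-2)
--     if maxl < 0:
--         return []
--     # difference array: each (l1,l2) contributes x[l1]*y[l2] on the
--     # contiguous index range [|l1-l2|, min(l1+l2, maxl)]
--     diff = [0]*(maxl+2)
--     for l1, a in enumerate(x):
--         for l2, b in enumerate(y):
--             lo = abs(l1-l2)
--             hi = min(l1+l2, maxl)
--             if lo <= hi:
--                 v = a*b
--                 diff[lo] += v
--                 diff[hi+1] -= v
--     out = []
--     s = 0
--     for d in diff[:maxl+1]:
--         s += d
--         out.append(s)
--     return out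
-- ===== Notes on version B (the rewrite author's own statement) =====
-- stated objective: alternative
-- what changed: Replaces A's innermost per-l accumulation loop by a difference array: each (l1,l2) pair does two point updates for its contiguous index range, and one final prefix-sum pass produces the result (intended as faster in the inner dimension; a timing run measured 4.7-13x on mid sizes but could not confirm it at the largest size, so no speed claim is made).
import Mathlib
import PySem

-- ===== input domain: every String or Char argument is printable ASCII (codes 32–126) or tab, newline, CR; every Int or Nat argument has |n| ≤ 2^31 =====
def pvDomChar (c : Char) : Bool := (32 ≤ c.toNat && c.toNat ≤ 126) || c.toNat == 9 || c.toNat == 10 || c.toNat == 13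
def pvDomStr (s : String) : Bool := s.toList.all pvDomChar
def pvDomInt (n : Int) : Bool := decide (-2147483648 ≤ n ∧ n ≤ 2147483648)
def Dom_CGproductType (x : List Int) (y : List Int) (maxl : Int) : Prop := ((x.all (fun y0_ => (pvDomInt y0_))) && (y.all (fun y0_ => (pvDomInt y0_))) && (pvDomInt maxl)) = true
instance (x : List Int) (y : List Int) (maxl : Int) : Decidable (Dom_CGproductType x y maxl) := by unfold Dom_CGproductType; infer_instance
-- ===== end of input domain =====

-- B replaces the innermost per-l accumulation loop of A by a difference array
-- (two point updates per (l1,l2) pair) followed by one prefix-sum pass; return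
-- values are proved equal on all inputs.

-- ===== PORT A =====
-- r[l] += … is ported with the total pySetD/pyGetD: the index l always satisfies
-- |l1-l2| ≤ l ≤ maxl < len(r), so Python never raises there and the total form is exact.
def CGproductType (x : List Int) (y : List Int) (maxl : Int) : List Int :=
  let maxl1 : Int := if maxl = -1 then (x.length : Int) + (y.length : Int) - 2 else maxl
  let maxl2 : Int := min maxl1 ((x.length : Int) + (y.length : Int) - 2)
  let r : List Int := List.replicate (maxl2 + 1).toNat 0   -- [0]*(maxl+1): negative count gives []
  (PySem.List.pyRange 0 (x.length : Int) 1).foldl (fun r l1 =>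
    (PySem.List.pyRange 0 (y.length : Int) 1).foldl (fun r l2 =>
      (PySem.List.pyRange |l1 - l2| (min (l1 + l2) maxl2 + 1) 1).foldl (fun r l =>
        PySem.List.pySetD r l
          (PySem.List.pyGetD r l 0 + PySem.List.pyGetD x l1 0 * PySem.List.pyGetD y l2 0)) r) r) r

-- ===== PORT B =====
-- diff[lo] += v / diff[hi+1] -= v likewise use the total pySetD/pyGetD: under the
-- guard lo ≤ hi ≤ maxl both indices are inside diff (length maxl+2), exact as Python.
def CGproductType_alt (x : List Int) (y : List Int) (maxl : Int) : List Int :=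
  let maxl1 : Int := if maxl = -1 then (x.length : Int) + (y.length : Int) - 2 else maxl
  let maxl2 : Int := min maxl1 ((x.length : Int) + (y.length : Int) - 2)
  if maxl2 < 0 then []
  else
    let diff : List Int :=
      (PySem.List.enumerate x 0).foldl (fun diff p =>
        (PySem.List.enumerate y 0).foldl (fun diff q =>
          let lo : Int := |p.1 - q.1|
          let hi : Int := min (p.1 + q.1) maxl2
          if lo ≤ hi then
            let v := p.2 * q.2
            let d1 := PySem.List.pySetD diff lo (PySem.List.pyGetD diff lo 0 + v)
            PySem.List.pySetD d1 (hi + 1) (PySem.List.pyGetD d1 (hi + 1) 0 - v)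
          else diff) diff) (List.replicate (maxl2 + 2).toNat 0)
    ((diff.take (maxl2 + 1).toNat).foldl
        (fun (acc : List Int × Int) d => (acc.1 ++ [acc.2 + d], acc.2 + d)) ([], 0)).1

-- ===== PRECONDITION & SPEC =====
def Spec_CGproductType (x : List Int) (y : List Int) (maxl : Int) (out : List Int) : Prop := out = CGproductType_alt x y maxl
instance (x : List Int) (y : List Int) (maxl : Int) (out : List Int) : Decidable (Spec_CGproductType x y maxl out) := by unfold Spec_CGproductType; infer_instance

-- ===== CLAIM (what is proved, stated in full; the proofs are below) =====
def Claim_equal_CGproductType : Prop := ∀ (x : List Int) (y : List Int) (maxl : Int), Dom_CGproductType x y maxl → Spec_CGproductType x y maxl (CGproductType x y maxl)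

-- ===== LEMMAS AND PROOFS =====

-- transporting a relation through two foldl's over the same list
theorem pvFoldRel {a b c : Type} (R : a -> b -> Prop) (f : a -> c -> a) (g : b -> c -> b)
    (l : List c) (h : forall z, z ∈ l -> forall s t, R s t -> R (f s z) (g t z)) :
    forall s t, R s t -> R (l.foldl f s) (l.foldl g t) := by
  induction l with
  | nil => intro s t hst; simpa using hst
  | cons z l ih =>
    intro s t hst
    simp only [List.foldl_cons]
    exact ih (fun z' hz' => h z' (by simp [hz'])) _ _ (h z (by simp) s t hst)

-- a foldl whose step never changes the state is the identity
theorem pvFoldlId {a c : Type} (f : a -> c -> a) (l : List c)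
    (h : forall s z, f s z = s) : forall s, l.foldl f s = s := by
  induction l with
  | nil => intro s; simp
  | cons z l ih => intro s; simp only [List.foldl_cons, h]; exact ih s

-- effect of A's innermost loop: add v at every index in [lo, b)
theorem pvRangeAdd (v : Int) : forall (n : Nat) (lo b : Int) (r : List Int),
    0 <= lo -> b <= (r.length : Int) -> (b - lo).toNat = n ->
    (((PySem.List.pyRange lo b 1).foldl
        (fun r l => PySem.List.pySetD r l (PySem.List.pyGetD r l 0 + v)) r).length = r.length ∧
     forall k : Nat, k < r.length ->
       PySem.List.pyGetD ((PySem.List.pyRange lo b 1).foldl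
          (fun r l => PySem.List.pySetD r l (PySem.List.pyGetD r l 0 + v)) r) (k : Int) 0
         = PySem.List.pyGetD r (k : Int) 0 + (if lo <= (k : Int) ∧ (k : Int) < b then v else 0)) := by
  intro n
  induction n with
  | zero =>
    intro lo b r h0 hb hn
    rw [PySem.List.pyRange_one_eq_nil (by omega)]
    simp only [List.foldl_nil]
    refine ⟨trivial, fun k hk => ?_⟩
    rw [if_neg (by omega), add_zero]
  | succ n ih =>
    intro lo b r h0 hb hn
    rw [PySem.List.pyRange_one_cons (by omega)]
    simp only [List.foldl_cons]
    have hset : (PySem.List.pySetD r lo (PySem.List.pyGetD r lo 0 + v)).length = r.length :=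
      PySem.List.length_pySetD r lo _
    obtain ⟨hlen, hpt⟩ := ih (lo + 1) b (PySem.List.pySetD r lo (PySem.List.pyGetD r lo 0 + v))
      (by omega) (by rw [hset]; exact hb) (by omega)
    refine ⟨by rw [hlen, hset], fun k hk => ?_⟩
    rw [hpt k (by rw [hset]; exact hk)]
    have hlo : lo = ((lo.toNat : Nat) : Int) := by omega
    rw [hlo]
    rw [PySem.List.pyGetD_pySetD_natCast r lo.toNat k _ 0 (by omega)]
    by_cases hk0 : k = lo.toNat
    · rw [if_pos hk0, hk0]
      have hc1 : ¬(((lo.toNat : Nat) : Int) + 1 ≤ ((lo.toNat : Nat) : Int) ∧ ((lo.toNat : Nat) : Int) < b) := by omega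
      have hc2 : ((lo.toNat : Nat) : Int) ≤ ((lo.toNat : Nat) : Int) ∧ ((lo.toNat : Nat) : Int) < b := ⟨le_refl _, by omega⟩
      rw [if_neg hc1, if_pos hc2, add_zero]
    · rw [if_neg hk0]
      have hne : (k : Int) ≠ ((lo.toNat : Nat) : Int) := by
        intro h; exact hk0 (by exact_mod_cast h)
      split_ifs <;> first | rfl | (exfalso; omega)

-- effect of a single set on the sum of a prefix (Nat-index version)
theorem pvSumTakeSet : forall (l : List Int) (n : Nat) (a : Int) (m : Nat),
    n < l.length ->
    ((l.set n a).take m).sum = (l.take m).sum + (if n < m then a - l.getD n 0 else 0) := by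
  intro l
  induction l with
  | nil => intro n a m h; simp at h
  | cons hd t ih =>
    intro n a m hn
    cases n with
    | zero =>
      cases m with
      | zero => simp
      | succ m => simp [List.set]; ring
    | succ n =>
      cases m with
      | zero => simp
      | succ m =>
        have := ih n a m (by simpa using hn)
        simp only [List.set, List.take_succ_cons, List.sum_cons, List.getD_cons_succ, this]
        split_ifs <;> first | (exfalso; omega) | ring1

-- Int-index wrapper in PySem vocabulary
theorem pvSumTakeSetD (l : List Int) (i : Int) (a : Int) (m : Nat)
    (h0 : 0 <= i) (h1 : i < (l.length : Int)) :
    ((PySem.List.pySetD l i a).take m).sum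
      = (l.take m).sum + (if i < (m : Int) then a - PySem.List.pyGetD l i 0 else 0) := by
  rw [PySem.List.pySetD_of_nonneg l a h0, PySem.List.pyGetD_eq_getElem l 0 h0 h1,
    pvSumTakeSet l i.toNat a m (by omega)]
  have hg : l.getD i.toNat 0 = l[i.toNat]'(by omega) := List.getD_eq_getElem l 0 (by omega)
  rw [hg]
  congr 1
  split_ifs <;> first | rfl | (exfalso; omega)

-- the prefix-sum pass of B, characterised
theorem pvScan : forall (xs acc : List Int) (s : Int),
    (xs.foldl (fun (acc : List Int × Int) d => (acc.1 ++ [acc.2 + d], acc.2 + d)) (acc, s)).1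
      = acc ++ (List.range xs.length).map (fun k => s + (xs.take (k + 1)).sum) := by
  intro xs
  induction xs with
  | nil => intro acc s; simp
  | cons d t ih =>
    intro acc s
    simp only [List.foldl_cons]
    rw [ih]
    simp only [List.length_cons, List.range_succ_eq_map, List.map_cons, List.map_map]
    simp [Function.comp, List.take_succ_cons, add_assoc]

-- the coupling invariant between A's result array and B's difference array
def pvR (M : Int) (r diff : List Int) : Prop :=
  r.length = (M + 1).toNat ∧ diff.length = (M + 2).toNat ∧
  forall k : Nat, k < (M + 1).toNat ->
    PySem.List.pyGetD r (k : Int) 0 = (diff.take (k + 1)).sum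

-- one (l1,l2) pair: A's range-add and B's two point updates preserve the invariant
theorem pvPairStep (M l1 l2 v : Int) (hM : 0 <= M) (h1 : 0 <= l1) (h2 : 0 <= l2)
    (r diff : List Int) (hR : pvR M r diff) :
    pvR M ((PySem.List.pyRange |l1 - l2| (min (l1 + l2) M + 1) 1).foldl
             (fun r l => PySem.List.pySetD r l (PySem.List.pyGetD r l 0 + v)) r)
          (if |l1 - l2| <= min (l1 + l2) M then
             PySem.List.pySetD
               (PySem.List.pySetD diff |l1 - l2| (PySem.List.pyGetD diff |l1 - l2| 0 + v))
               (min (l1 + l2) M + 1)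
               (PySem.List.pyGetD
                 (PySem.List.pySetD diff |l1 - l2| (PySem.List.pyGetD diff |l1 - l2| 0 + v))
                 (min (l1 + l2) M + 1) 0 - v)
           else diff) := by
  obtain ⟨hr, hd, hpt⟩ := hR
  have hrI : (r.length : Int) = M + 1 := by omega
  have hdI : (diff.length : Int) = M + 2 := by omega
  set lo : Int := |l1 - l2| with hlo
  set hi : Int := min (l1 + l2) M with hhi
  have hlo0 : 0 <= lo := abs_nonneg _
  by_cases hcase : lo <= hi
  · rw [if_pos hcase]
    have hhiM : hi <= M := min_le_right _ _
    obtain ⟨hlen, hptA⟩ := pvRangeAdd v (hi + 1 - lo).toNat lo (hi + 1) r hlo0 (by omega) rfl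
    set d1 := PySem.List.pySetD diff lo (PySem.List.pyGetD diff lo 0 + v) with hd1def
    have hd1len : d1.length = diff.length := PySem.List.length_pySetD diff lo _
    refine ⟨by rw [hlen, hr],
      by rw [PySem.List.length_pySetD, hd1len, hd],
      fun k hk => ?_⟩
    rw [hptA k (by omega)]
    rw [pvSumTakeSetD d1 (hi + 1) _ (k + 1) (by omega) (by rw [hd1len]; omega)]
    rw [hd1def, pvSumTakeSetD diff lo _ (k + 1) hlo0 (by omega)]
    rw [hpt k hk]
    have e1 : PySem.List.pyGetD diff lo 0 + v - PySem.List.pyGetD diff lo 0 = v := by ring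
    have e2 : PySem.List.pyGetD d1 (hi + 1) 0 - v - PySem.List.pyGetD d1 (hi + 1) 0 = -v := by ring
    rw [e1, ← hd1def, e2]
    push_cast
    split_ifs <;> first | (exfalso; omega) | ring1
  · rw [if_neg hcase]
    rw [PySem.List.pyRange_one_eq_nil (by omega)]
    exact ⟨hr, hd, hpt⟩

-- initial state: both arrays all zero
theorem pvInit (M : Int) : pvR M (List.replicate (M + 1).toNat 0) (List.replicate (M + 2).toNat 0) := by
  refine ⟨List.length_replicate, List.length_replicate, fun k hk => ?_⟩
  rw [PySem.List.pyGetD_natCast,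
    List.getD_eq_getElem _ _ (show k < (List.replicate (M + 1).toNat (0 : Int)).length by
      rw [List.length_replicate]; exact hk)]
  simp [List.take_replicate]

-- ===== VERDICT (by name: the statement is the Claim_ definition above) =====
theorem CGproductType_spec : Claim_equal_CGproductType := by
  unfold Claim_equal_CGproductType Spec_CGproductType CGproductType CGproductType_alt
  intro x y maxl _
  dsimp only
  set M : Int := min (if maxl = -1 then (x.length : Int) + (y.length : Int) - 2 else maxl)
      ((x.length : Int) + (y.length : Int) - 2) with hMdef
  by_cases hMneg : M < 0
  · rw [if_pos hMneg]
    have hrep : List.replicate (M + 1).toNat (0 : Int) = [] := by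
      have : (M + 1).toNat = 0 := by omega
      rw [this]; rfl
    rw [hrep]
    exact pvFoldlId _ _ (fun s z => pvFoldlId _ _ (fun s' z' => by
      rw [PySem.List.pyRange_one_eq_nil (by
        have ha := abs_nonneg (z - z')
        have hm := min_le_right (z + z') M
        omega), List.foldl_nil]) s) []
  · rw [if_neg hMneg]
    have hM0 : 0 ≤ M := not_lt.mp hMneg
    simp only [PySem.List.enumerate_eq_map_pyRange x (0 : Int),
      PySem.List.enumerate_eq_map_pyRange y (0 : Int), List.foldl_map, PySem.List.len_eq]
    have hrel : pvR M
        ((PySem.List.pyRange 0 (x.length : Int) 1).foldl (fun r l1 =>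
          (PySem.List.pyRange 0 (y.length : Int) 1).foldl (fun r l2 =>
            (PySem.List.pyRange |l1 - l2| (min (l1 + l2) M + 1) 1).foldl (fun r l =>
              PySem.List.pySetD r l
                (PySem.List.pyGetD r l 0 + PySem.List.pyGetD x l1 0 * PySem.List.pyGetD y l2 0)) r) r)
          (List.replicate (M + 1).toNat 0))
        ((PySem.List.pyRange 0 (x.length : Int) 1).foldl (fun diff l1 =>
          (PySem.List.pyRange 0 (y.length : Int) 1).foldl (fun diff l2 =>
            if |l1 - l2| ≤ min (l1 + l2) M then
              PySem.List.pySetD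
                (PySem.List.pySetD diff |l1 - l2|
                  (PySem.List.pyGetD diff |l1 - l2| 0 + PySem.List.pyGetD x l1 0 * PySem.List.pyGetD y l2 0))
                (min (l1 + l2) M + 1)
                (PySem.List.pyGetD
                  (PySem.List.pySetD diff |l1 - l2|
                    (PySem.List.pyGetD diff |l1 - l2| 0 + PySem.List.pyGetD x l1 0 * PySem.List.pyGetD y l2 0))
                  (min (l1 + l2) M + 1) 0 - PySem.List.pyGetD x l1 0 * PySem.List.pyGetD y l2 0)
            else diff) diff)
          (List.replicate (M + 2).toNat 0)) := by
      apply pvFoldRel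
      · intro l1 hl1 s t hst
        apply pvFoldRel
        · intro l2 hl2 s' t' hst'
          exact pvPairStep M l1 l2 _ hM0 (PySem.List.mem_pyRange_one.mp hl1).1
            (PySem.List.mem_pyRange_one.mp hl2).1 s' t' hst'
        · exact hst
      · exact pvInit M
    obtain ⟨hlenA, hlenB, hptF⟩ := hrel
    rw [pvScan]
    apply List.ext_getElem
    · simp only [hlenA, List.nil_append, List.length_map, List.length_range,
        List.length_take, hlenB]
      omega
    · intro k h1k h2k
      have hk : k < (M + 1).toNat := by rw [hlenA] at h1k; exact h1k
      have hv := hptF k hk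
      rw [PySem.List.pyGetD_natCast, List.getD_eq_getElem _ _ h1k] at hv
      rw [hv]
      simp only [List.nil_append, List.getElem_map, List.getElem_range, List.take_take]
      rw [min_eq_left (by omega), zero_add]
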